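-- pv_equiv track=rewrite | github.com/bacchu/python_samples | checkforprimenumberdiv.py | find_k_for_prime
-- ===== SOURCE A (Python) =====
-- def find_k_for_prime(prime):
--     """
--     Find the value of k for a prime number according to the rule:
--     Multiply the prime by consecutive numbers until you get a number ending in 1 or 9.
--     If it ends in 1, k is negative; if it ends in 9, k is positive.
--     """
--     for i in range(1, prime + 1):
--         product = prime * i
--         if product % 10 == 1:
--             # Calculate k using the formula: 10k - 1 = product
--             k = (product + 1) // 10
--             return -k
--         elif product % 10 == 9:
--             # Calculate k using the formula: 10k - 1 = product
--             k = (product + 1) // 10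
--             return k
--
--     # This should not happen for primes, but just in case
--     return None
-- ===== SOURCE B (Python) =====
-- def find_k_for_prime(prime):
--     # Closed form: the last digit of prime*i depends only on the last digit of prime,
--     # so the first hit (if any) is read off a table: last digit -> (first i, sign of k).
--     if prime <= 0:
--         return None
--     hits = {1: (1, -1), 9: (1, 1), 3: (3, 1), 7: (3, -1)}
--     hit = hits.get(prime % 10)
--     if hit is None:
--         return None
--     i, sign = hit
--     return sign * ((prime * i + 1) // 10)
-- ===== Notes on version B (the rewrite author's own statement) =====
-- stated objective: alternative
-- what changed: Replaces the scan over i = 1..prime by a closed form: the hit index and the sign of k depend only on the last decimal digit of prime, read from a four-entry table.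
import Mathlib
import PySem

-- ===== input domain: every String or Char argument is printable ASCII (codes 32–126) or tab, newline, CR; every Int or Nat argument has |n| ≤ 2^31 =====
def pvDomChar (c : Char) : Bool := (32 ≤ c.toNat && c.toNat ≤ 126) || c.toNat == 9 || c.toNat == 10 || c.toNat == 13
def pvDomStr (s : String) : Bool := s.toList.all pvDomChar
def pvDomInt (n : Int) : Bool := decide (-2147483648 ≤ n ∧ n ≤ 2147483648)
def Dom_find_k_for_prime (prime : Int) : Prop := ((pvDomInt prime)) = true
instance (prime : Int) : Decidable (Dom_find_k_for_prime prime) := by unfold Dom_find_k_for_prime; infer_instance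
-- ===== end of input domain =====

-- B replaces the scan over i = 1..prime by a table lookup on the last decimal digit of prime (objective: alternative).


-- ===== PORT A =====
-- loop body of A: the value returned (if any) at index i; early return = List.findSome?
def pvLoopA (prime i : Int) : Option Int :=
  let product := prime * i
  if PySem.Int.mod product 10 = 1 then some (-(PySem.Int.floordiv (product + 1) 10))
  else if PySem.Int.mod product 10 = 9 then some (PySem.Int.floordiv (product + 1) 10)
  else none

-- the for-loop itself: try i, on no return continue with i+1, stop past prime
def pvGoA (prime i : Int) : Option Int :=
  if _h : i < prime + 1 then
    match pvLoopA prime i with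
    | some r => some r
    | none => pvGoA prime (i + 1)
  else none
termination_by (prime + 1 - i).toNat
decreasing_by omega

def find_k_for_prime (prime : Int) : Option Int := pvGoA prime 1

-- ===== PORT B =====
def pvHits : PySem.Dict Int (Int × Int) :=
  PySem.Dict.ofList [(1, (1, -1)), (9, (1, 1)), (3, (3, 1)), (7, (3, -1))]

def find_k_for_prime_alt (prime : Int) : Option Int :=
  if prime ≤ 0 then none
  else
    match pvHits.get? (PySem.Int.mod prime 10) with
    | none => none
    | some (i, sign) => some (sign * PySem.Int.floordiv (prime * i + 1) 10)

-- ===== PRECONDITION & SPEC =====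
def Spec_find_k_for_prime (prime : Int) (out : Option Int) : Prop := out = find_k_for_prime_alt prime
instance (prime : Int) (out : Option Int) : Decidable (Spec_find_k_for_prime prime out) := by unfold Spec_find_k_for_prime; infer_instance

-- ===== CLAIM (what is proved, stated in full; the proofs are below) =====
def Claim_equal_find_k_for_prime : Prop := ∀ (prime : Int), Dom_find_k_for_prime prime → Spec_find_k_for_prime prime (find_k_for_prime prime)

-- ===== LEMMAS AND PROOFS =====

theorem pvGoA_eq (prime i : Int) :
    pvGoA prime i = (PySem.List.pyRange i (prime + 1) 1).findSome? (pvLoopA prime) := by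
  rw [pvGoA]
  split_ifs with h
  · rw [PySem.List.pyRange_one_cons h, List.findSome?_cons]
    cases hc : pvLoopA prime i with
    | some r => rfl
    | none => exact pvGoA_eq prime (i + 1)
  · rw [PySem.List.pyRange_one_eq_nil (by omega)]; rfl
termination_by (prime + 1 - i).toNat
decreasing_by omega

theorem pvMod10 (x : Int) : PySem.Int.mod x 10 = x % 10 :=
  PySem.Int.mod_eq_emod_of_pos (by norm_num)

-- If prime is even or divisible by 5, no product prime*i ever ends in 1 or 9.
theorem pvLoopA_none_of_even (prime i : Int) (h : prime % 2 = 0) : pvLoopA prime i = none := by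
  have hdvd : (2:Int) ∣ prime * i := (Int.dvd_of_emod_eq_zero h).mul_right i
  have h2 : (prime * i) % 2 = 0 := Int.emod_eq_zero_of_dvd hdvd
  simp only [pvLoopA, pvMod10]
  rw [if_neg (by omega), if_neg (by omega)]

theorem pvLoopA_none_of_five (prime i : Int) (h : prime % 5 = 0) : pvLoopA prime i = none := by
  have hdvd : (5:Int) ∣ prime * i := (Int.dvd_of_emod_eq_zero h).mul_right i
  have h5 : (prime * i) % 5 = 0 := Int.emod_eq_zero_of_dvd hdvd
  simp only [pvLoopA, pvMod10]
  rw [if_neg (by omega), if_neg (by omega)]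

theorem findA_none (prime : Int) (h : prime % 2 = 0 ∨ prime % 5 = 0) :
    find_k_for_prime prime = none := by
  unfold find_k_for_prime
  rw [pvGoA_eq, List.findSome?_eq_none_iff]
  intro i _
  rcases h with h | h
  · exact pvLoopA_none_of_even prime i h
  · exact pvLoopA_none_of_five prime i h

-- B on a positive input, as a function of the table lookup at the last digit
theorem findB_pos (prime : Int) (hle : 0 < prime) :
    find_k_for_prime_alt prime =
      match pvHits.get? (prime % 10) with
      | none => none
      | some (i, sign) => some (sign * PySem.Int.floordiv (prime * i + 1) 10) := by
  unfold find_k_for_prime_alt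
  rw [if_neg (by omega), pvMod10]

-- ===== VERDICT (by name: the statement is the Claim_ definition above) =====
theorem find_k_for_prime_spec : Claim_equal_find_k_for_prime := by
  intro prime _
  unfold Spec_find_k_for_prime
  by_cases hle : prime ≤ 0
  · -- empty range; B's first branch
    unfold find_k_for_prime find_k_for_prime_alt
    rw [pvGoA_eq, PySem.List.pyRange_one_eq_nil (by omega)]
    simp [hle]
  · replace hle : 0 < prime := by omega
    rw [findB_pos prime hle]
    have hd : 0 ≤ prime % 10 ∧ prime % 10 < 10 :=
      ⟨Int.emod_nonneg _ (by norm_num), Int.emod_lt_of_pos _ (by norm_num)⟩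
    have hbase : prime % 10 = 0 ∨ prime % 10 = 1 ∨ prime % 10 = 2 ∨ prime % 10 = 3 ∨
        prime % 10 = 4 ∨ prime % 10 = 5 ∨ prime % 10 = 6 ∨ prime % 10 = 7 ∨
        prime % 10 = 8 ∨ prime % 10 = 9 := by omega
    rcases hbase with h|h|h|h|h|h|h|h|h|h
    · rw [findA_none prime (by omega), h, show pvHits.get? 0 = none from by decide]
    · -- d = 1: hit at i = 1, k negative
      unfold find_k_for_prime
      rw [pvGoA_eq, PySem.List.pyRange_one_cons (by omega), List.findSome?_cons,
        show pvLoopA prime 1 = some (-(PySem.Int.floordiv (prime * 1 + 1) 10)) from by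
          simp only [pvLoopA, pvMod10]; rw [if_pos (by omega)],
        h, show pvHits.get? 1 = some (1, -1) from by decide]
      simp
    · rw [findA_none prime (by omega), h, show pvHits.get? 2 = none from by decide]
    · -- d = 3: misses at i = 1, 2; hit at i = 3, k positive
      unfold find_k_for_prime
      have h3 : (3:Int) ≤ prime := by omega
      rw [pvGoA_eq, PySem.List.pyRange_one_cons (by omega), PySem.List.pyRange_one_cons (by omega),
        PySem.List.pyRange_one_cons (by omega), List.findSome?_cons, List.findSome?_cons,
        List.findSome?_cons,
        show pvLoopA prime 1 = none from by
          simp only [pvLoopA, pvMod10]; rw [if_neg (by omega), if_neg (by omega)],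
        show pvLoopA prime (1+1) = none from by
          simp only [pvLoopA, pvMod10]; rw [if_neg (by omega), if_neg (by omega)],
        show pvLoopA prime (1+1+1) = some (PySem.Int.floordiv (prime * (1+1+1) + 1) 10) from by
          simp only [pvLoopA, pvMod10]; rw [if_neg (by omega), if_pos (by omega)],
        h, show pvHits.get? 3 = some (3, 1) from by decide]
      simp
    · rw [findA_none prime (by omega), h, show pvHits.get? 4 = none from by decide]
    · rw [findA_none prime (by omega), h, show pvHits.get? 5 = none from by decide]
    · rw [findA_none prime (by omega), h, show pvHits.get? 6 = none from by decide]
    · -- d = 7: misses at i = 1, 2; hit at i = 3, k negative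
      unfold find_k_for_prime
      have h3 : (3:Int) ≤ prime := by omega
      rw [pvGoA_eq, PySem.List.pyRange_one_cons (by omega), PySem.List.pyRange_one_cons (by omega),
        PySem.List.pyRange_one_cons (by omega), List.findSome?_cons, List.findSome?_cons,
        List.findSome?_cons,
        show pvLoopA prime 1 = none from by
          simp only [pvLoopA, pvMod10]; rw [if_neg (by omega), if_neg (by omega)],
        show pvLoopA prime (1+1) = none from by
          simp only [pvLoopA, pvMod10]; rw [if_neg (by omega), if_neg (by omega)],
        show pvLoopA prime (1+1+1) = some (-(PySem.Int.floordiv (prime * (1+1+1) + 1) 10)) from by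
          simp only [pvLoopA, pvMod10]; rw [if_pos (by omega)],
        h, show pvHits.get? 7 = some (3, -1) from by decide]
      simp
    · rw [findA_none prime (by omega), h, show pvHits.get? 8 = none from by decide]
    · -- d = 9: hit at i = 1, k positive
      unfold find_k_for_prime
      rw [pvGoA_eq, PySem.List.pyRange_one_cons (by omega), List.findSome?_cons,
        show pvLoopA prime 1 = some (PySem.Int.floordiv (prime * 1 + 1) 10) from by
          simp only [pvLoopA, pvMod10]; rw [if_neg (by omega), if_pos (by omega)],
        h, show pvHits.get? 9 = some (1, 1) from by decide]
      simp
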